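-- pv_equiv track=rewrite | github.com/jaikishanEngg/Intermediate-DSA-ScalerAcademy | Arrays/CarryForward/Q2_ClosestMinMax.py | solve
-- ===== SOURCE A (Python) =====
-- import math
--
-- def solve(A):
--     Amin = min(A)
--     Amax = max(A)
--     n = len(A)
--     last_max_index = -1
--     last_min_index = -1
--     distance = math.inf
--     if(Amin == Amax):
--         return 1 #distance would be that segment itself and its 1
--     for i in range(n):
--         if(A[i] == Amax):
--             last_max_index = i
--         if(A[i] == Amin):
--             last_min_index = i
--         if(last_max_index != -1 and last_min_index != -1):
--             distance = min(distance, abs(last_max_index - last_min_index) + 1)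
--
--     return distance
-- ===== SOURCE B (Python) =====
-- def solve(A):
--     Amin = min(A)
--     Amax = max(A)
--     mins = [i for i, v in enumerate(A) if v == Amin]
--     maxs = [i for i, v in enumerate(A) if v == Amax]
--     return min(abs(i - j) for i in mins for j in maxs) + 1
-- ===== Notes on version B (the rewrite author's own statement) =====
-- stated objective: simpler
-- what changed: Replaces the carry-forward scan with last-seen indices and a running distance by collecting the index lists of the global min and max once and taking the minimum |i-j| over the two lists, which also makes the Amin==Amax special case disappear.
import Mathlib
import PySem

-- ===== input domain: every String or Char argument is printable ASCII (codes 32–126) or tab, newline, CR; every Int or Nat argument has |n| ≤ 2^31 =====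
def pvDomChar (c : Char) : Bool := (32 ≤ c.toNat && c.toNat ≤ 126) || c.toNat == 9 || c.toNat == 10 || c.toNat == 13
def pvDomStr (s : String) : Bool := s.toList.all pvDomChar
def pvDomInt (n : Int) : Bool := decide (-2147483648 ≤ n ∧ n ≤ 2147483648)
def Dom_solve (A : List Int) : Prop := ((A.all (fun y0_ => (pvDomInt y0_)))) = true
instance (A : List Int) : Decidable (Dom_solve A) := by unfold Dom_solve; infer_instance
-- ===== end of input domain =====

-- B replaces A's carry-forward scan by the index lists of the global min and max
-- and the minimum |i-j| over the two lists (objective: simpler, no special case).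

-- ===== PORT A =====
def solve (A : List Int) : Int :=
  match PySem.List.min? A (fun x => x), PySem.List.max? A (fun x => x) with
  | some amin, some amax =>
    if amin = amax then 1
    else
      -- distance = math.inf ported as `none`; it is never returned: amin ≠ amax
      -- means both extremes occur, so the last iteration sets a finite distance.
      let s := (PySem.List.pyRange 0 (A.length : Int) 1).foldl
        (fun (s : Int × Int × Option Int) i =>
          let lmax := if PySem.List.pyGetD A i 0 = amax then i else s.1
          let lmin := if PySem.List.pyGetD A i 0 = amin then i else s.2.1
          let dist := if lmax ≠ -1 ∧ lmin ≠ -1 then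
              some (match s.2.2 with
                    | none => |lmax - lmin| + 1
                    | some d => min d (|lmax - lmin| + 1))
            else s.2.2
          (lmax, lmin, dist))
        (-1, -1, (none : Option Int))
      s.2.2.getD 0
  | _, _ => 0   -- unreachable under Pre_solve (min()/max() of [] raise ValueError)

-- ===== PORT B =====
def solve_alt (A : List Int) : Int :=
  match PySem.List.min? A (fun x => x) with
  | none => 0   -- unreachable under Pre_solve (min() of [] raises ValueError)
  | some amin =>
    match PySem.List.max? A (fun x => x) with
    | none => 0   -- unreachable under Pre_solve
    | some amax =>
      let mins := (PySem.List.enumerate A 0).filterMap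
        (fun p => if p.2 = amin then some p.1 else none)
      let maxs := (PySem.List.enumerate A 0).filterMap
        (fun p => if p.2 = amax then some p.1 else none)
      ((PySem.List.min? (mins.flatMap (fun i => maxs.map (fun j => |i - j|)))
          (fun x => x)).getD 0) + 1

-- ===== PRECONDITION & SPEC =====
-- Pre_: A raises ValueError (min of empty sequence) on the empty list.
def Pre_solve (A : List Int) : Prop := A ≠ []
instance (A : List Int) : Decidable (Pre_solve A) := by unfold Pre_solve; infer_instance
def pvWitness_solve : List Int := [1, 2]

def Spec_solve (A : List Int) (out : Int) : Prop := out = solve_alt A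
instance (A : List Int) (out : Int) : Decidable (Spec_solve A out) := by unfold Spec_solve; infer_instance

-- ===== CLAIM (what is proved, stated in full; the proofs are below) =====
def Claim_equal_solve : Prop := ∀ (A : List Int), Dom_solve A → Pre_solve A → Spec_solve A (solve A)

-- ===== LEMMAS AND PROOFS =====

-- A's loop body, as a step function over (index, value) pairs.
def stepA (amin amax : Int) (s : Int × Int × Option Int) (p : Int × Int) : Int × Int × Option Int :=
  let lmax := if p.2 = amax then p.1 else s.1
  let lmin := if p.2 = amin then p.1 else s.2.1
  let dist := if lmax ≠ -1 ∧ lmin ≠ -1 then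
      some (match s.2.2 with
            | none => |lmax - lmin| + 1
            | some d => min d (|lmax - lmin| + 1))
    else s.2.2
  (lmax, lmin, dist)

-- "m is the carry-forward last index of value v in l" (−1 = not seen yet).
def GoodLast (v : Int) (l : List (Int × Int)) (m : Int) : Prop :=
  (m = -1 ∧ ∀ p ∈ l, p.2 ≠ v) ∨ ((m, v) ∈ l ∧ ∀ p ∈ l, p.2 = v → p.1 ≤ m)

-- "d is the minimal |max-index − min-index| + 1 over pairs in l".
def MinPair (amin amax d : Int) (l : List (Int × Int)) : Prop :=
  (∃ p ∈ l, ∃ q ∈ l, p.2 = amax ∧ q.2 = amin ∧ d = |p.1 - q.1| + 1) ∧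
  (∀ p ∈ l, ∀ q ∈ l, p.2 = amax → q.2 = amin → d ≤ |p.1 - q.1| + 1)

def InvA (amin amax : Int) (l : List (Int × Int)) (s : Int × Int × Option Int) : Prop :=
  GoodLast amax l s.1 ∧ GoodLast amin l s.2.1 ∧
  ((s.2.2 = none ∧ ((∀ p ∈ l, p.2 ≠ amax) ∨ (∀ p ∈ l, p.2 ≠ amin))) ∨
   (∃ d, s.2.2 = some d ∧ MinPair amin amax d l))

lemma invA_foldl (amin amax : Int) (l : List (Int × Int))
    (hnn : ∀ p ∈ l, 0 ≤ p.1) (hinc : l.Pairwise (fun p q => p.1 < q.1)) :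
    InvA amin amax l (l.foldl (stepA amin amax) (-1, -1, none)) := by
  induction l using List.reverseRecOn with
  | nil =>
    unfold InvA GoodLast
    exact ⟨Or.inl ⟨rfl, by simp⟩, Or.inl ⟨rfl, by simp⟩, Or.inl ⟨rfl, Or.inl (by simp)⟩⟩
  | append_singleton l p ih =>
    have hp0 : 0 ≤ p.1 := hnn p (by simp)
    have hnnl : ∀ q ∈ l, 0 ≤ q.1 := fun q hq => hnn q (by simp [hq])
    have hlt : ∀ q ∈ l, q.1 < p.1 := by
      rcases List.pairwise_append.mp hinc with ⟨_, _, h⟩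
      exact fun q hq => h q hq p (by simp)
    have hs := ih hnnl (List.pairwise_append.mp hinc).1
    set s := l.foldl (stepA amin amax) (-1, -1, none) with hsdef
    rw [List.foldl_append]
    obtain ⟨hGmax, hGmin, hdist⟩ := hs
    simp only [List.foldl]
    set lmax' := if p.2 = amax then p.1 else s.1 with hlm
    set lmin' := if p.2 = amin then p.1 else s.2.1 with hlmn
    have hstep : stepA amin amax s p =
        (lmax', lmin', if lmax' ≠ -1 ∧ lmin' ≠ -1 then
            some (match s.2.2 with
                  | none => |lmax' - lmin'| + 1
                  | some d => min d (|lmax' - lmin'| + 1))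
          else s.2.2) := rfl
    rw [hstep]
    have hGmax' : GoodLast amax (l ++ [p]) lmax' := by
      by_cases hv : p.2 = amax
      · have hl : lmax' = p.1 := if_pos hv
        right
        constructor
        · rw [hl, ← hv]
          simp
        · intro q hq hq2
          rw [hl]
          rcases List.mem_append.mp hq with h | h
          · exact le_of_lt (hlt q h)
          · simp at h; rw [h]
      · have hl : lmax' = s.1 := if_neg hv
        rcases hGmax with ⟨h1, h2⟩ | ⟨h1, h2⟩
        · left
          refine ⟨hl ▸ h1, ?_⟩
          intro q hq
          rcases List.mem_append.mp hq with h | h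
          · exact h2 q h
          · simp at h; rw [h]; exact hv
        · right
          refine ⟨?_, ?_⟩
          · rw [hl]; exact List.mem_append_left _ h1
          · intro q hq hq2
            rw [hl]
            rcases List.mem_append.mp hq with h | h
            · exact h2 q h hq2
            · simp at h; exact absurd (h ▸ hq2) hv
    have hGmin' : GoodLast amin (l ++ [p]) lmin' := by
      by_cases hv : p.2 = amin
      · have hl : lmin' = p.1 := if_pos hv
        right
        constructor
        · rw [hl, ← hv]
          simp
        · intro q hq hq2
          rw [hl]
          rcases List.mem_append.mp hq with h | h
          · exact le_of_lt (hlt q h)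
          · simp at h; rw [h]
      · have hl : lmin' = s.2.1 := if_neg hv
        rcases hGmin with ⟨h1, h2⟩ | ⟨h1, h2⟩
        · left
          refine ⟨hl ▸ h1, ?_⟩
          intro q hq
          rcases List.mem_append.mp hq with h | h
          · exact h2 q h
          · simp at h; rw [h]; exact hv
        · right
          refine ⟨?_, ?_⟩
          · rw [hl]; exact List.mem_append_left _ h1
          · intro q hq hq2
            rw [hl]
            rcases List.mem_append.mp hq with h | h
            · exact h2 q h hq2
            · simp at h; exact absurd (h ▸ hq2) hv
    have hmaxchar : lmax' ≠ -1 →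
        (lmax', amax) ∈ l ++ [p] ∧ ∀ q ∈ l ++ [p], q.2 = amax → q.1 ≤ lmax' := by
      intro h
      rcases hGmax' with ⟨h1, _⟩ | ⟨h1, h2⟩
      · exact absurd h1 h
      · exact ⟨h1, h2⟩
    have hminchar : lmin' ≠ -1 →
        (lmin', amin) ∈ l ++ [p] ∧ ∀ q ∈ l ++ [p], q.2 = amin → q.1 ≤ lmin' := by
      intro h
      rcases hGmin' with ⟨h1, _⟩ | ⟨h1, h2⟩
      · exact absurd h1 h
      · exact ⟨h1, h2⟩
    have hmaxnone : lmax' = -1 → ∀ q ∈ l ++ [p], q.2 ≠ amax := by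
      intro h
      rcases hGmax' with ⟨_, h2⟩ | ⟨h1, _⟩
      · exact h2
      · have h0 := hnn _ h1
        simp at h0
        omega
    have hminnone : lmin' = -1 → ∀ q ∈ l ++ [p], q.2 ≠ amin := by
      intro h
      rcases hGmin' with ⟨_, h2⟩ | ⟨h1, _⟩
      · exact h2
      · have h0 := hnn _ h1
        simp at h0
        omega
    have hleP : ∀ q ∈ l ++ [p], q.1 ≤ p.1 := by
      intro q hq
      rcases List.mem_append.mp hq with h | h
      · exact le_of_lt (hlt q h)
      · simp at h; rw [h]
    have hmaxle : lmax' ≠ -1 → lmax' ≤ p.1 := by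
      intro h
      have := hleP _ (hmaxchar h).1
      simpa using this
    have hminle : lmin' ≠ -1 → lmin' ≤ p.1 := by
      intro h
      have := hleP _ (hminchar h).1
      simpa using this
    have hkey : lmax' ≠ -1 → lmin' ≠ -1 → ∀ pa ∈ l ++ [p], ∀ qa ∈ l ++ [p],
        pa.2 = amax → qa.2 = amin → (pa = p ∨ qa = p) →
        |lmax' - lmin'| ≤ |pa.1 - qa.1| := by
      intro hx hn pa hpa qa hqa h2a h2i hcase
      rcases hcase with rfl | rfl
      · have hlmx : lmax' = pa.1 := by rw [hlm, if_pos h2a]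
        have h1 : qa.1 ≤ lmin' := (hminchar hn).2 qa hqa h2i
        have h2 : lmin' ≤ pa.1 := hminle hn
        have e1 : |lmax' - lmin'| = pa.1 - lmin' := by
          rw [hlmx]; exact abs_of_nonneg (by omega)
        have e2 : pa.1 - qa.1 ≤ |pa.1 - qa.1| := le_abs_self _
        omega
      · have hlmx : lmin' = qa.1 := by rw [hlmn, if_pos h2i]
        have h1 : pa.1 ≤ lmax' := (hmaxchar hx).2 pa hpa h2a
        have h2 : lmax' ≤ qa.1 := hmaxle hx
        have e1 : |lmax' - lmin'| = qa.1 - lmax' := by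
          rw [hlmx, abs_sub_comm]; exact abs_of_nonneg (by omega)
        have e2 : qa.1 - pa.1 ≤ |pa.1 - qa.1| := by
          rw [abs_sub_comm]; exact le_abs_self _
        omega
    unfold InvA
    refine ⟨hGmax', hGmin', ?_⟩
    by_cases hc : lmax' ≠ -1 ∧ lmin' ≠ -1
    · rw [if_pos hc]
      obtain ⟨hxmem, hxmax⟩ := hmaxchar hc.1
      obtain ⟨hnmem, hnmax⟩ := hminchar hc.2
      rcases hdist with ⟨hnone, hnoex⟩ | ⟨d, hd, hex, hmini⟩
      · rw [hnone]
        right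
        refine ⟨|lmax' - lmin'| + 1, rfl,
          ⟨(lmax', amax), hxmem, (lmin', amin), hnmem, rfl, rfl, by simp⟩, ?_⟩
        intro pa hpa qa hqa h2a h2i
        have hPcase : pa = p ∨ qa = p := by
          by_contra hno
          push Not at hno
          have hpal : pa ∈ l := by
            rcases List.mem_append.mp hpa with h | h
            · exact h
            · simp at h; exact absurd h hno.1
          have hqal : qa ∈ l := by
            rcases List.mem_append.mp hqa with h | h
            · exact h
            · simp at h; exact absurd h hno.2
          rcases hnoex with hA | hI
          · exact hA pa hpal h2a
          · exact hI qa hqal h2i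
        have := hkey hc.1 hc.2 pa hpa qa hqa h2a h2i hPcase
        omega
      · rw [hd]
        right
        refine ⟨min d (|lmax' - lmin'| + 1), rfl, ?_, ?_⟩
        · rcases le_total d (|lmax' - lmin'| + 1) with hle | hle
          · rw [min_eq_left hle]
            obtain ⟨pa, hpa, qa, hqa, h2a, h2i, hdv⟩ := hex
            exact ⟨pa, List.mem_append_left _ hpa, qa, List.mem_append_left _ hqa,
              h2a, h2i, hdv⟩
          · rw [min_eq_right hle]
            exact ⟨(lmax', amax), hxmem, (lmin', amin), hnmem, rfl, rfl, by simp⟩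
        · intro pa hpa qa hqa h2a h2i
          by_cases hPcase : pa ∈ l ∧ qa ∈ l
          · have h1 := hmini pa hPcase.1 qa hPcase.2 h2a h2i
            have h2 : min d (|lmax' - lmin'| + 1) ≤ d := min_le_left _ _
            omega
          · have hor : pa = p ∨ qa = p := by
              rcases List.mem_append.mp hpa with h | h
              · rcases List.mem_append.mp hqa with h' | h'
                · exact absurd ⟨h, h'⟩ hPcase
                · right; simpa using h'
              · left; simpa using h
            have h1 := hkey hc.1 hc.2 pa hpa qa hqa h2a h2i hor
            have h2 : min d (|lmax' - lmin'| + 1) ≤ |lmax' - lmin'| + 1 := min_le_right _ _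
            omega
    · rw [if_neg hc]
      have hc' : lmax' = -1 ∨ lmin' = -1 := by
        by_cases h1 : lmax' = -1
        · exact Or.inl h1
        · right; by_contra h2; exact hc ⟨h1, h2⟩
      have hnoany : (∀ q ∈ l ++ [p], q.2 ≠ amax) ∨ (∀ q ∈ l ++ [p], q.2 ≠ amin) := by
        rcases hc' with h | h
        · exact Or.inl (hmaxnone h)
        · exact Or.inr (hminnone h)
      have hnone : s.2.2 = none := by
        rcases hdist with ⟨h, _⟩ | ⟨d, hd, ⟨pa, hpa, qa, hqa, h2a, h2i, _⟩, _⟩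
        · exact h
        · exfalso
          rcases hnoany with hA | hI
          · exact hA pa (List.mem_append_left _ hpa) h2a
          · exact hI qa (List.mem_append_left _ hqa) h2i
      exact Or.inl ⟨hnone, hnoany⟩

-- membership in B's index lists
lemma mem_idxlist (A : List Int) (v i : Int) :
    i ∈ (PySem.List.enumerate A 0).filterMap (fun p => if p.2 = v then some p.1 else none) ↔
      (i, v) ∈ PySem.List.enumerate A 0 := by
  constructor
  · intro h
    rcases List.mem_filterMap.mp h with ⟨p, hp, he⟩
    by_cases hv : p.2 = v
    · simp [hv] at he; rcases he with rfl
      have : p = (p.1, v) := by cases p; simp_all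
      exact this ▸ hp
    · simp [hv] at he
  · intro h
    exact List.mem_filterMap.mpr ⟨(i, v), h, by simp⟩

-- occurrence of a value of A as an element of enumerate A 0
lemma mem_enum_of_mem (A : List Int) (v : Int) (hv : v ∈ A) :
    ∃ i : Int, (i, v) ∈ PySem.List.enumerate A 0 := by
  obtain ⟨k, hk, hkv⟩ := List.mem_iff_getElem.mp hv
  exact ⟨(k : Int), (PySem.List.mem_enumerate_iff A 0 _).mpr ⟨k, hk, by simp [hkv]⟩⟩

lemma enum_fst_nonneg (A : List Int) (p : Int × Int)
    (hp : p ∈ PySem.List.enumerate A 0) : 0 ≤ p.1 := by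
  rcases (PySem.List.mem_enumerate_iff A 0 p).mp hp with ⟨k, hk, rfl⟩
  simp

theorem solve_spec : Claim_equal_solve := by
  intro A _ hpre
  unfold Spec_solve
  rcases hmin : PySem.List.min? A (fun x => x) with _ | amin
  · exact absurd ((PySem.List.min?_eq_none_iff A _).mp hmin) hpre
  rcases hmax : PySem.List.max? A (fun x => x) with _ | amax
  · exact absurd ((PySem.List.max?_eq_none_iff A _).mp hmax) hpre
  have hminA : amin ∈ A := PySem.List.min?_mem hmin
  have hmaxA : amax ∈ A := PySem.List.max?_mem hmax
  obtain ⟨ii, hii⟩ := mem_enum_of_mem A amin hminA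
  obtain ⟨ia, hia⟩ := mem_enum_of_mem A amax hmaxA
  simp only [solve, solve_alt, hmin, hmax]
  set mins := (PySem.List.enumerate A 0).filterMap
      (fun p => if p.2 = amin then some p.1 else none) with hminsdef
  set maxs := (PySem.List.enumerate A 0).filterMap
      (fun p => if p.2 = amax then some p.1 else none) with hmaxsdef
  set ds := mins.flatMap (fun i => maxs.map (fun j => |i - j|)) with hdsdef
  have hii' : ii ∈ mins := (mem_idxlist A amin ii).mpr hii
  have hia' : ia ∈ maxs := (mem_idxlist A amax ia).mpr hia
  have hmem_ds : ∀ x ∈ ds, ∃ i ∈ mins, ∃ j ∈ maxs, x = |i - j| := by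
    intro x hx
    rcases List.mem_flatMap.mp hx with ⟨i, hi, hx'⟩
    rcases List.mem_map.mp hx' with ⟨j, hj, rfl⟩
    exact ⟨i, hi, j, hj, rfl⟩
  by_cases heq : amin = amax
  · rw [if_pos heq]
    have h0 : (0 : Int) ∈ ds := by
      refine List.mem_flatMap.mpr ⟨ii, hii', List.mem_map.mpr ⟨ii, ?_, by simp⟩⟩
      rw [hmaxsdef, ← heq]
      exact hii'
    rcases hds : PySem.List.min? ds (fun x => x) with _ | m
    · rw [PySem.List.min?_eq_none_iff] at hds
      rw [hds] at h0
      simp at h0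
    · have h1 : m ≤ 0 := PySem.List.min?_isMin hds 0 h0
      have h2 : m ∈ ds := PySem.List.min?_mem hds
      obtain ⟨i, _, j, _, rfl⟩ := hmem_ds m h2
      have h3 : (0 : Int) ≤ |i - j| := abs_nonneg _
      simp only [Option.getD_some]
      omega
  · rw [if_neg heq]
    -- rewrite A's fold over range(n) as a fold of stepA over enumerate(A)
    have hfold : (PySem.List.pyRange 0 (A.length : Int) 1).foldl
        (fun (s : Int × Int × Option Int) i =>
          let lmax := if PySem.List.pyGetD A i 0 = amax then i else s.1
          let lmin := if PySem.List.pyGetD A i 0 = amin then i else s.2.1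
          let dist := if lmax ≠ -1 ∧ lmin ≠ -1 then
              some (match s.2.2 with
                    | none => |lmax - lmin| + 1
                    | some d => min d (|lmax - lmin| + 1))
            else s.2.2
          (lmax, lmin, dist)) (-1, -1, (none : Option Int)) =
        (PySem.List.enumerate A 0).foldl (stepA amin amax) (-1, -1, none) := by
      rw [PySem.List.enumerate_eq_map_pyRange A 0, List.foldl_map]
      rfl
    rw [hfold]
    have hInv := invA_foldl amin amax (PySem.List.enumerate A 0)
      (enum_fst_nonneg A) (PySem.List.pairwise_lt_enumerate A 0)
    unfold InvA at hInv
    obtain ⟨_, _, hdist⟩ := hInv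
    rcases hdist with ⟨_, hnoex⟩ | ⟨d, hd, ⟨pa, hpa, qa, hqa, h2a, h2i, hdv⟩, hmini⟩
    · exfalso
      rcases hnoex with hA | hI
      · exact hA (ia, amax) hia rfl
      · exact hI (ii, amin) hii rfl
    · rw [hd]
      have hpa1 : pa.1 ∈ maxs := by
        refine (mem_idxlist A amax pa.1).mpr ?_
        have : pa = (pa.1, amax) := by rw [← h2a]
        exact this ▸ hpa
      have hqa1 : qa.1 ∈ mins := by
        refine (mem_idxlist A amin qa.1).mpr ?_
        have : qa = (qa.1, amin) := by rw [← h2i]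
        exact this ▸ hqa
      have hdin : |qa.1 - pa.1| ∈ ds :=
        List.mem_flatMap.mpr ⟨qa.1, hqa1, List.mem_map.mpr ⟨pa.1, hpa1, rfl⟩⟩
      rcases hds : PySem.List.min? ds (fun x => x) with _ | m
      · rw [PySem.List.min?_eq_none_iff] at hds
        rw [hds] at hdin
        simp at hdin
      · have hm1 : m ≤ |qa.1 - pa.1| := PySem.List.min?_isMin hds _ hdin
        have hm2 : m ∈ ds := PySem.List.min?_mem hds
        obtain ⟨i, hi, j, hj, rfl⟩ := hmem_ds m hm2
        have hij : (i, amin) ∈ PySem.List.enumerate A 0 := (mem_idxlist A amin i).mp hi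
        have hjj : (j, amax) ∈ PySem.List.enumerate A 0 := (mem_idxlist A amax j).mp hj
        have hmini' : d ≤ |j - i| + 1 := hmini (j, amax) hjj (i, amin) hij rfl rfl
        have habs1 : |i - j| = |j - i| := abs_sub_comm _ _
        have habs2 : |qa.1 - pa.1| = |pa.1 - qa.1| := abs_sub_comm _ _
        simp only [Option.getD_some]
        omega
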